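-- pv_equiv track=rewrite | github.com/apoorvajavali/python-problems | SharesPurchase.py | analyzeInvestments
-- ===== SOURCE A (Python) =====
-- def analyzeInvestments(string):
--     substr = []
--     main = ['A', 'B', 'C']
--     count = 0
--     res = [string[i: j] for i in range(len(string))
--            for j in range(i + 1, len(string) + 1)]
--
--     for s in set(res):
--         if len(set(main) & set(s)) == 3:
--             count += 1
--     return count
-- ===== SOURCE B (Python) =====
-- def analyzeInvestments(string):
--     lastA = lastB = lastC = -1
--     good = set()
--     j = 0
--     for c in string:
--         j += 1
--         if c == 'A':
--             lastA = j - 1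
--         elif c == 'B':
--             lastB = j - 1
--         elif c == 'C':
--             lastC = j - 1
--         m = min(lastA, lastB, lastC)
--         for i in range(m + 1):
--             good.add(string[i:j])
--     return len(good)
-- ===== Notes on version B (the rewrite author's own statement) =====
-- stated objective: faster
-- what changed: Instead of materializing every substring, deduplicating them all, and testing each with a set intersection, B makes one left-to-right pass tracking the last position of each of the three required letters and inserts into the result set only the qualifying substrings (those whose start is at most the minimum of the three last positions), returning that set's size.
import Mathlib
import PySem

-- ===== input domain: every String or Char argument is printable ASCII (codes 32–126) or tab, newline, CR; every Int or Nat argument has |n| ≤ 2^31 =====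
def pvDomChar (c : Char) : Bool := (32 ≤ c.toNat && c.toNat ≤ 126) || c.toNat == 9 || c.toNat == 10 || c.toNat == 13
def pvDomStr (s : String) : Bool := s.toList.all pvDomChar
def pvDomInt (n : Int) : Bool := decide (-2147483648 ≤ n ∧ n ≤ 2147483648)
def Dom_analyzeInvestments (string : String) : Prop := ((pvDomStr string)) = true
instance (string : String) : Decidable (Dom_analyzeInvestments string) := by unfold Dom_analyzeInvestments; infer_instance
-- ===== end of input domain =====

-- B replaces "enumerate all substrings, deduplicate, test each with a set intersection" by one
-- left-to-right pass tracking the last positions of 'A','B','C', inserting only qualifying substrings.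

-- ===== PORT A =====
def analyzeInvestments (string : String) : Int :=
  let cs := string.toList
  let main : List Char := ['A', 'B', 'C']
  let count : Int := 0
  let res : List (List Char) :=
    (PySem.List.pyRange 0 (cs.length : Int) 1).flatMap (fun i =>
      (PySem.List.pyRange (i + 1) ((cs.length : Int) + 1) 1).map (fun j =>
        PySem.List.slice cs (some i) (some j)))
  (PySem.Set.ofList res).foldl
    (fun count s =>
      if PySem.Set.len (PySem.Set.inter (PySem.Set.ofList main) (PySem.Set.ofList s)) == 3
      then count + 1 else count) count

-- ===== PORT B =====
-- one loop step: j += 1; update the last position of 'A'/'B'/'C'; add all substrings cs[i:j], 0 ≤ i ≤ min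
def pvStepB (cs : List Char) (st : (Int × Int × Int) × Int × PySem.Set (List Char)) (c : Char) :
    (Int × Int × Int) × Int × PySem.Set (List Char) :=
  let lA := st.1.1
  let lB := st.1.2.1
  let lC := st.1.2.2
  let j : Int := st.2.1 + 1
  let ls :=
    if c = 'A' then (j - 1, lB, lC)
    else if c = 'B' then (lA, j - 1, lC)
    else if c = 'C' then (lA, lB, j - 1)
    else (lA, lB, lC)
  let m := min ls.1 (min ls.2.1 ls.2.2)
  let good := (PySem.List.pyRange 0 (m + 1) 1).foldl
    (fun g i => PySem.Set.add g (PySem.List.slice cs (some i) (some j))) st.2.2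
  (ls, j, good)

def analyzeInvestments_alt (string : String) : Int :=
  let cs := string.toList
  let fin := cs.foldl (pvStepB cs) ((-1, -1, -1), 0, PySem.Set.empty)
  PySem.Set.len fin.2.2

-- ===== PRECONDITION & SPEC =====
def Spec_analyzeInvestments (string : String) (out : Int) : Prop := out = analyzeInvestments_alt string
instance (string : String) (out : Int) : Decidable (Spec_analyzeInvestments string out) := by unfold Spec_analyzeInvestments; infer_instance

-- ===== CLAIM (what is proved, stated in full; the proofs are below) =====
def Claim_equal_analyzeInvestments : Prop := ∀ (string : String), Dom_analyzeInvestments string → Spec_analyzeInvestments string (analyzeInvestments string)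

-- ===== LEMMAS AND PROOFS =====

-- the substring cs[i:j] (natural bounds), and the qualifying predicate (Prop and Bool forms)
def pvSl (cs : List Char) (i j : Nat) : List Char := List.take (j - i) (List.drop i cs)

def pvP (s : List Char) : Prop := 'A' ∈ s ∧ 'B' ∈ s ∧ 'C' ∈ s

def pvPb (s : List Char) : Bool :=
  PySem.Set.len (PySem.Set.inter (PySem.Set.ofList ['A', 'B', 'C']) (PySem.Set.ofList s)) == 3

-- "l is the index of the last occurrence of c in pre (or -1 if absent)"
def pvLast (pre : List Char) (c : Char) (l : Int) : Prop :=
  (l = -1 ∧ c ∉ pre) ∨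
  (∃ k : Nat, l = (k : Int) ∧ k < pre.length ∧ pre[k]? = some c ∧
    ∀ k' : Nat, k < k' → pre[k']? ≠ some c)

lemma pvPb_iff (s : List Char) : pvPb s = true ↔ pvP s := by
  have hm : PySem.Set.ofList ['A','B','C'] = ['A','B','C'] := by decide
  unfold pvPb pvP
  rw [hm]
  by_cases hA : 'A' ∈ s <;> by_cases hB : 'B' ∈ s <;> by_cases hC : 'C' ∈ s <;>
    simp [PySem.Set.inter, PySem.Set.len, List.filter, hA, hB, hC]

-- A's fold is a distinct-substring count
lemma pvA_count (string : String) :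
    analyzeInvestments string =
      ((PySem.Set.ofList
        ((PySem.List.pyRange 0 (string.toList.length : Int) 1).flatMap (fun i =>
          (PySem.List.pyRange (i + 1) ((string.toList.length : Int) + 1) 1).map (fun j =>
            PySem.List.slice string.toList (some i) (some j))))).countP pvPb : Int) := by
  unfold analyzeInvestments
  dsimp only
  rw [PySem.List.foldl_count_if
    (fun s => ((PySem.Set.ofList ['A','B','C']).inter (PySem.Set.ofList s)).len == 3)]
  norm_num
  rfl

lemma pv_mem_foldl_add {α β : Type} [BEq α] [LawfulBEq α] (f : β → α) (L : List β)
    (g : PySem.Set α) (x : α) :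
    x ∈ L.foldl (fun g i => PySem.Set.add g (f i)) g ↔ x ∈ g ∨ ∃ i ∈ L, x = f i := by
  induction L generalizing g with
  | nil => simp
  | cons b L ih =>
      simp [List.foldl_cons, ih, PySem.Set.mem_add]
      tauto

lemma pv_nodup_foldl_add {α β : Type} [BEq α] [LawfulBEq α] (f : β → α) (L : List β)
    (g : PySem.Set α) (h : g.Nodup) :
    (L.foldl (fun g i => PySem.Set.add g (f i)) g).Nodup := by
  induction L generalizing g with
  | nil => exact h
  | cons b L ih => exact ih _ (PySem.Set.nodup_add _ _ h)

lemma pvLast_lt (pre : List Char) (c : Char) (l : Int) (h : pvLast pre c l) :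
    l < pre.length := by
  rcases h with ⟨h1, _⟩ | ⟨k, hk, hlt, _⟩
  · omega
  · omega

lemma pvLast_le_iff (pre : List Char) (c : Char) (l : Int) (h : pvLast pre c l) (i : Nat) :
    ((i : Int) ≤ l) ↔ ∃ k : Nat, i ≤ k ∧ k < pre.length ∧ pre[k]? = some c := by
  constructor
  · intro hil
    rcases h with ⟨h1, _⟩ | ⟨k, hk, hlt, he, _⟩
    · omega
    · exact ⟨k, by omega, hlt, he⟩
  · rintro ⟨k, hik, hk, he⟩
    rcases h with ⟨h1, hnm⟩ | ⟨k0, hk0, hlt0, he0, hmax⟩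
    · exact absurd (List.mem_of_getElem? he) hnm
    · by_contra hlt
      exact hmax k (by omega) he

lemma pvLast_step (pre : List Char) (c ch : Char) (l : Int) (h : pvLast pre c l) :
    pvLast (pre ++ [ch]) c (if ch = c then (pre.length : Int) else l) := by
  by_cases hch : ch = c
  · subst hch
    right
    refine ⟨pre.length, by simp, by simp, by simp, ?_⟩
    intro k' hk'
    rw [List.getElem?_eq_none (by simp; omega)]
    simp
  · simp only [hch, if_false]
    rcases h with ⟨h1, hnm⟩ | ⟨k, hk, hlt, he, hmax⟩
    · left
      refine ⟨h1, ?_⟩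
      simp [hnm]
      exact fun hh => hch hh.symm
    · right
      refine ⟨k, hk, by simp; omega, ?_, ?_⟩
      · rw [List.getElem?_append_left hlt]; exact he
      · intro k' hk'
        by_cases hin : k' < pre.length
        · rw [List.getElem?_append_left hin]; exact hmax k' hk'
        · by_cases heq : k' = pre.length
          · subst heq
            rw [List.getElem?_append_right (le_refl _)]
            simp
            exact fun hh => hch hh
          · rw [List.getElem?_eq_none (by simp; omega)]
            simp

lemma pv_mem_sl (cs : List Char) (i j : Nat) (c : Char) :
    c ∈ pvSl cs i j ↔ ∃ k : Nat, i ≤ k ∧ k < j ∧ cs[k]? = some c := by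
  unfold pvSl
  constructor
  · intro h
    rw [List.mem_take_iff_getElem] at h
    rcases h with ⟨m, hm, he⟩
    rw [List.getElem_drop] at he
    have hlen : i + m < cs.length := by simp at hm; omega
    refine ⟨i + m, by omega, by simp at hm; omega,
      by rw [List.getElem?_eq_getElem hlen]; exact congrArg some he⟩
  · rintro ⟨k, hik, hkj, he⟩
    have hk : k < cs.length := by
      by_contra hh
      simp [List.getElem?_eq_none (by omega : cs.length ≤ k)] at he
    rw [List.mem_take_iff_getElem]
    refine ⟨k - i, by simp; omega, ?_⟩
    rw [List.getElem_drop]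
    have h2 : i + (k - i) = k := by omega
    rw [List.getElem?_eq_getElem hk] at he
    simp only [h2]
    exact (Option.some_inj.mp he)

-- per-char: i ≤ last index of c in cs.take j  ↔  c occurs in cs[i:j]
lemma pv_char_window (cs : List Char) (c : Char) (l : Int) (i j : Nat)
    (h : pvLast (cs.take j) c l) :
    ((i : Int) ≤ l) ↔ c ∈ pvSl cs i j := by
  rw [pvLast_le_iff _ _ _ h i, pv_mem_sl]
  constructor
  · rintro ⟨k, hik, hk, he⟩
    have hkj : k < j := by simp at hk; omega
    refine ⟨k, hik, hkj, ?_⟩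
    rw [List.getElem?_take_of_lt hkj] at he
    exact he
  · rintro ⟨k, hik, hkj, he⟩
    have hkcs : k < cs.length := by
      by_contra hh
      simp [List.getElem?_eq_none (by omega : cs.length ≤ k)] at he
    refine ⟨k, hik, by simp; omega, ?_⟩
    rw [List.getElem?_take_of_lt hkj]
    exact he

-- one step of B's loop preserves the invariants
lemma pv_step_spec (cs pre : List Char) (c : Char) (rest : List Char)
    (hpre : pre ++ c :: rest = cs)
    (lA lB lC : Int) (hA : pvLast pre 'A' lA) (hB : pvLast pre 'B' lB) (hC : pvLast pre 'C' lC)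
    (good : PySem.Set (List Char)) (hnd : good.Nodup)
    (hmem : ∀ x, x ∈ good ↔ ∃ i j : Nat, i < j ∧ j ≤ pre.length ∧ x = pvSl cs i j ∧ pvP (pvSl cs i j)) :
    pvLast (pre ++ [c]) 'A' (pvStepB cs ((lA, lB, lC), (pre.length : Int), good) c).1.1 ∧
    pvLast (pre ++ [c]) 'B' (pvStepB cs ((lA, lB, lC), (pre.length : Int), good) c).1.2.1 ∧
    pvLast (pre ++ [c]) 'C' (pvStepB cs ((lA, lB, lC), (pre.length : Int), good) c).1.2.2 ∧
    (pvStepB cs ((lA, lB, lC), (pre.length : Int), good) c).2.1 = ((pre ++ [c]).length : Int) ∧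
    (pvStepB cs ((lA, lB, lC), (pre.length : Int), good) c).2.2.Nodup ∧
    (∀ x, x ∈ (pvStepB cs ((lA, lB, lC), (pre.length : Int), good) c).2.2 ↔
      ∃ i j : Nat, i < j ∧ j ≤ (pre ++ [c]).length ∧ x = pvSl cs i j ∧ pvP (pvSl cs i j)) := by
  have hAB : ('A' : Char) ≠ 'B' := by decide
  have hAC : ('A' : Char) ≠ 'C' := by decide
  have hBC : ('B' : Char) ≠ 'C' := by decide
  set L := (pre.length : Int) with hL
  set vA := if c = 'A' then L else lA with hvA
  set vB := if c = 'B' then L else lB with hvB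
  set vC := if c = 'C' then L else lC with hvC
  have hkey : pvStepB cs ((lA, lB, lC), L, good) c =
      ((vA, vB, vC), L + 1,
       (PySem.List.pyRange 0 (min vA (min vB vC) + 1) 1).foldl
         (fun g i => PySem.Set.add g (PySem.List.slice cs (some i) (some (L + 1)))) good) := by
    simp only [pvStepB, hvA, hvB, hvC]
    by_cases h1 : c = 'A'
    · subst h1; simp [hAB, hAC]
    · by_cases h2 : c = 'B'
      · subst h2; simp [Ne.symm hAB, hBC]
      · by_cases h3 : c = 'C'
        · subst h3; simp [h1, h2]
        · simp [h1, h2, h3]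
  -- the new last-position values
  have hA' : pvLast (pre ++ [c]) 'A' vA := by
    have := pvLast_step pre 'A' c lA hA
    simpa [hvA, hL] using this
  have hB' : pvLast (pre ++ [c]) 'B' vB := by
    have := pvLast_step pre 'B' c lB hB
    simpa [hvB, hL] using this
  have hC' : pvLast (pre ++ [c]) 'C' vC := by
    have := pvLast_step pre 'C' c lC hC
    simpa [hvC, hL] using this
  have htake : cs.take (pre.length + 1) = pre ++ [c] := by
    rw [← hpre, List.take_append]
    simp
  -- i qualifies  ↔  cs[i : pre.length+1] contains 'A','B','C'
  have hwin : ∀ i : Nat, ((i : Int) ≤ min vA (min vB vC)) ↔ pvP (pvSl cs i (pre.length + 1)) := by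
    intro i
    rw [le_min_iff, le_min_iff]
    rw [pv_char_window cs 'A' vA i (pre.length + 1) (htake ▸ hA'),
        pv_char_window cs 'B' vB i (pre.length + 1) (htake ▸ hB'),
        pv_char_window cs 'C' vC i (pre.length + 1) (htake ▸ hC')]
    rfl
  have hbound : ∀ i : Nat, ((i : Int) ≤ min vA (min vB vC)) → i < pre.length + 1 := by
    intro i hi
    have h1 := pvLast_lt _ _ _ hA'
    simp only [List.length_append, List.length_cons, List.length_nil] at h1
    have h2 : (i : Int) ≤ vA := le_trans hi (min_le_left _ _)
    omega
  rw [hkey]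
  refine ⟨hA', hB', hC', by simp [hL], pv_nodup_foldl_add _ _ _ hnd, ?_⟩
  intro x
  rw [pv_mem_foldl_add]
  constructor
  · rintro (hx | ⟨i, hi, rfl⟩)
    · obtain ⟨i, j, hij, hjn, rfl, hp⟩ := (hmem x).mp hx
      exact ⟨i, j, hij, by simp; omega, rfl, hp⟩
    · rw [PySem.List.mem_pyRange_one] at hi
      obtain ⟨hi0, hilt⟩ := hi
      lift i to Nat using hi0
      have him : (i : Int) ≤ min vA (min vB vC) := by omega
      have hlt := hbound i him
      have hsl : PySem.List.slice cs (some (i : Int)) (some (L + 1)) = pvSl cs i (pre.length + 1) := by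
        have hcast : L + 1 = ((pre.length + 1 : Nat) : Int) := by simp [hL]
        rw [hcast, PySem.List.slice_natCast]
        rfl
      rw [hsl]
      exact ⟨i, pre.length + 1, hlt, by simp, rfl, (hwin i).mp him⟩
  · rintro ⟨i, j, hij, hjn, rfl, hp⟩
    simp only [List.length_append, List.length_cons, List.length_nil] at hjn
    by_cases hsm : j ≤ pre.length
    · exact Or.inl ((hmem _).mpr ⟨i, j, hij, hsm, rfl, hp⟩)
    · have hjeq : j = pre.length + 1 := by omega
      subst hjeq
      right
      refine ⟨(i : Int), ?_, ?_⟩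
      · rw [PySem.List.mem_pyRange_one]
        have := (hwin i).mpr hp
        omega
      · have hcast : L + 1 = ((pre.length + 1 : Nat) : Int) := by simp [hL]
        rw [hcast, PySem.List.slice_natCast]
        rfl

-- B's loop invariant, by induction on the remaining suffix
lemma pv_loopB (cs : List Char) :
    ∀ (suf pre : List Char) (lA lB lC : Int) (good : PySem.Set (List Char)),
    pre ++ suf = cs →
    pvLast pre 'A' lA → pvLast pre 'B' lB → pvLast pre 'C' lC →
    good.Nodup →
    (∀ x, x ∈ good ↔ ∃ i j : Nat, i < j ∧ j ≤ pre.length ∧ x = pvSl cs i j ∧ pvP (pvSl cs i j)) →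
    (suf.foldl (pvStepB cs) ((lA, lB, lC), (pre.length : Int), good)).2.2.Nodup ∧
    (∀ x, x ∈ (suf.foldl (pvStepB cs) ((lA, lB, lC), (pre.length : Int), good)).2.2 ↔
      ∃ i j : Nat, i < j ∧ j ≤ cs.length ∧ x = pvSl cs i j ∧ pvP (pvSl cs i j)) := by
  intro suf
  induction suf with
  | nil =>
      intro pre lA lB lC good hpre hA hB hC hnd hmem
      have : pre = cs := by simpa using hpre
      subst this
      exact ⟨hnd, hmem⟩
  | cons c rest ih =>
      intro pre lA lB lC good hpre hA hB hC hnd hmem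
      obtain ⟨hA', hB', hC', hj, hnd', hmem'⟩ :=
        pv_step_spec cs pre c rest hpre lA lB lC hA hB hC good hnd hmem
      rw [List.foldl_cons]
      have hst : pvStepB cs ((lA, lB, lC), (pre.length : Int), good) c =
          (((pvStepB cs ((lA, lB, lC), (pre.length : Int), good) c).1.1,
            (pvStepB cs ((lA, lB, lC), (pre.length : Int), good) c).1.2.1,
            (pvStepB cs ((lA, lB, lC), (pre.length : Int), good) c).1.2.2),
          ((pre ++ [c]).length : Int),
          (pvStepB cs ((lA, lB, lC), (pre.length : Int), good) c).2.2) := by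
        rw [← hj]
      rw [hst]
      exact ih (pre ++ [c]) _ _ _ _ (by simpa using hpre) hA' hB' hC' hnd' hmem'

-- membership in A's substring list
lemma pv_mem_res (string : String) (x : List Char) :
    (x ∈ (PySem.List.pyRange 0 (string.toList.length : Int) 1).flatMap (fun i =>
          (PySem.List.pyRange (i + 1) ((string.toList.length : Int) + 1) 1).map (fun j =>
            PySem.List.slice string.toList (some i) (some j)))) ↔
    ∃ i j : Nat, i < j ∧ j ≤ string.toList.length ∧ x = pvSl string.toList i j := by
  simp only [List.mem_flatMap, List.mem_map, PySem.List.mem_pyRange_one]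
  constructor
  · rintro ⟨i, ⟨hi0, hin⟩, j, ⟨hij, hjn⟩, rfl⟩
    have hj0 : 0 ≤ j := by omega
    lift i to Nat using hi0
    lift j to Nat using hj0
    refine ⟨i, j, by omega, by omega, ?_⟩
    rw [PySem.List.slice_natCast]
    rfl
  · rintro ⟨i, j, hij, hjn, rfl⟩
    refine ⟨(i : Int), ⟨by omega, by omega⟩, (j : Int), ⟨by omega, by omega⟩, ?_⟩
    rw [PySem.List.slice_natCast]
    rfl

-- ===== VERDICT (by name: the statement is the Claim_ definition above) =====
theorem analyzeInvestments_spec : Claim_equal_analyzeInvestments := by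
  intro string _
  unfold Spec_analyzeInvestments
  set cs := string.toList with hcs
  -- B's side
  have hinit : ∀ c : Char, pvLast ([] : List Char) c (-1) := by
    intro c; left; exact ⟨rfl, by simp⟩
  obtain ⟨hnd, hmem⟩ := pv_loopB cs cs [] (-1) (-1) (-1) PySem.Set.empty (by simp)
    (hinit 'A') (hinit 'B') (hinit 'C') (by simp [PySem.Set.empty]) (by
      intro x; simp [PySem.Set.empty])
  -- A's side
  rw [pvA_count]
  have hres := pv_mem_res string
  set res := (PySem.List.pyRange 0 (cs.length : Int) 1).flatMap (fun i =>
      (PySem.List.pyRange (i + 1) ((cs.length : Int) + 1) 1).map (fun j =>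
        PySem.List.slice cs (some i) (some j))) with hres_def
  -- the two nodup lists have the same members, hence equal length
  have hfil_nodup : ((PySem.Set.ofList res).filter pvPb).Nodup :=
    (PySem.Set.nodup_ofList res).filter _
  have hperm : ((PySem.Set.ofList res).filter pvPb).Perm
      ((cs.foldl (pvStepB cs) ((-1, -1, -1), ((List.length ([] : List Char) : Int)), PySem.Set.empty)).2.2) := by
    rw [List.perm_ext_iff_of_nodup hfil_nodup hnd]
    intro x
    rw [List.mem_filter, hmem x]
    constructor
    · rintro ⟨hx, hp⟩
      obtain ⟨i, j, hij, hjn, rfl⟩ := (hres x).mp ((PySem.Set.mem_ofList _ _).mp hx)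
      exact ⟨i, j, hij, hjn, rfl, (pvPb_iff _).mp hp⟩
    · rintro ⟨i, j, hij, hjn, rfl, hp⟩
      refine ⟨(PySem.Set.mem_ofList _ _).mpr ((hres _).mpr ⟨i, j, hij, hjn, rfl⟩), (pvPb_iff _).mpr hp⟩
  unfold analyzeInvestments_alt
  dsimp only
  rw [PySem.Set.len]
  rw [List.countP_eq_length_filter]
  simp only [List.length_nil, Nat.cast_zero] at hperm
  rw [hperm.length_eq]
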